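-- pv_equiv track=rewrite | github.com/moshiyiqie/HeaderXtractor | pythonsrc/LineSpecific.py | digitMore3
-- ===== SOURCE A (Python) =====
-- def digitMore3(line):
-- 	digitNum=0
-- 	for ch in line:
-- 		if str.isdigit(ch):
-- 			digitNum += 1
-- 			if digitNum >= 3: return True
-- 		else:
-- 			digitNum = 0
-- 	return False
-- ===== SOURCE B (Python) =====
-- from itertools import groupby
--
-- def digitMore3(line):
--     return any(k and sum(1 for _ in g) >= 3
--                for k, g in groupby(line, key=str.isdigit))
-- ===== Notes on version B (the rewrite author's own statement) =====
-- stated objective: idiomatic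
-- what changed: Replaces the reset-counter loop with an early return by itertools.groupby keyed on str.isdigit: partition the line into maximal same-class runs and ask whether any digit run has length >= 3.
import Mathlib
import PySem

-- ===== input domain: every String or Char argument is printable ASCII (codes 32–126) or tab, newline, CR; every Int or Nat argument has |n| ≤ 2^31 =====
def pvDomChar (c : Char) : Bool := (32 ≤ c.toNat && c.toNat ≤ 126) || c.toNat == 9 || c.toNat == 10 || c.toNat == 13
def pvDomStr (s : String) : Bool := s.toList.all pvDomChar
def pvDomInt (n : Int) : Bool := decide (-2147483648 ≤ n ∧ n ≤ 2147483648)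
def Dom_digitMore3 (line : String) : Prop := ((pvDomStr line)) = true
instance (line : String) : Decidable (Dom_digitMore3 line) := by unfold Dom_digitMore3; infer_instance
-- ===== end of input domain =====

-- B replaces A's reset-counter loop with a groupby-into-runs decomposition; same values, same cost.
-- ===== PORT A =====
-- the for-loop with its early `return True`: counter digitNum threaded through the recursion
def pvALoop : List Char → Int → Bool
  | [], _ => false
  | c :: cs, digitNum =>
    if PySem.Chars.isdigit c then
      if digitNum + 1 ≥ 3 then true else pvALoop cs (digitNum + 1)
    else pvALoop cs 0

def digitMore3 (line : String) : Bool := pvALoop line.toList 0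

-- ===== PORT B =====
-- groupby(line, key=str.isdigit) as (key, run-length) pairs, built left to right
def pvGroupsGo (k : Bool) (n : Nat) : List Char → List (Bool × Nat)
  | [] => [(k, n)]
  | c :: cs =>
    if PySem.Chars.isdigit c = k then pvGroupsGo k (n + 1) cs
    else (k, n) :: pvGroupsGo (PySem.Chars.isdigit c) 1 cs

def digitMore3_alt (line : String) : Bool :=
  match line.toList with
  | [] => false
  | c :: cs => (pvGroupsGo (PySem.Chars.isdigit c) 1 cs).any fun g => g.1 && decide (3 ≤ g.2)

-- ===== PRECONDITION & SPEC =====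
def Spec_digitMore3 (line : String) (out : Bool) : Prop := out = digitMore3_alt line
instance (line : String) (out : Bool) : Decidable (Spec_digitMore3 line out) := by unfold Spec_digitMore3; infer_instance

-- ===== CLAIM (what is proved, stated in full; the proofs are below) =====
def Claim_equal_digitMore3 : Prop := ∀ (line : String), Dom_digitMore3 line → Spec_digitMore3 line (digitMore3 line)

-- ===== LEMMAS AND PROOFS =====

-- ===== VERDICT (by name: the statement is the Claim_ definition above) =====
theorem pvMain : ∀ (cs : List Char) (k : Bool) (n : Nat),
    ((pvGroupsGo k n cs).any fun g => g.1 && decide (3 ≤ g.2))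
      = ((k && decide (3 ≤ n)) || pvALoop cs (if k then (n : Int) else 0)) := by
  intro cs
  induction cs with
  | nil => intro k n; simp [pvGroupsGo, pvALoop]
  | cons c cs ih =>
    intro k n
    cases hk : PySem.Chars.isdigit c with
    | false =>
      cases k with
      | false =>
        rw [show pvGroupsGo false n (c :: cs) = pvGroupsGo false (n + 1) cs by
          simp [pvGroupsGo, hk], ih]
        simp [pvALoop, hk]
      | true =>
        rw [show pvGroupsGo true n (c :: cs) = (true, n) :: pvGroupsGo false 1 cs by
          simp [pvGroupsGo, hk]]
        simp only [List.any_cons, ih]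
        simp [pvALoop, hk]
    | true =>
      cases k with
      | false =>
        rw [show pvGroupsGo false n (c :: cs) = (false, n) :: pvGroupsGo true 1 cs by
          simp [pvGroupsGo, hk]]
        simp only [List.any_cons, ih]
        have h1 : ¬ ((0 : Int) + 1 ≥ 3) := by norm_num
        simp [pvALoop, hk, h1]
      | true =>
        rw [show pvGroupsGo true n (c :: cs) = pvGroupsGo true (n + 1) cs by
          simp [pvGroupsGo, hk], ih]
        by_cases h3 : 3 ≤ n + 1
        · have h3' : ((n : Int) + 1 ≥ 3) := by exact_mod_cast by omega
          simp [pvALoop, hk, h3, h3']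
        · have h3' : ¬ ((n : Int) + 1 ≥ 3) := by exact_mod_cast by omega
          have h4 : ¬ (3 ≤ n) := by omega
          simp [pvALoop, hk, h3, h3', h4]

theorem digitMore3_spec : Claim_equal_digitMore3 := by
  intro line _
  unfold Spec_digitMore3 digitMore3 digitMore3_alt
  cases h : line.toList with
  | nil => simp [pvALoop]
  | cons c cs =>
    show pvALoop (c :: cs) 0
      = (pvGroupsGo (PySem.Chars.isdigit c) 1 cs).any fun g => g.1 && decide (3 ≤ g.2)
    rw [pvMain]
    cases hk : PySem.Chars.isdigit c with
    | false => simp [pvALoop, hk]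
    | true =>
      have : ¬ ((0 : Int) + 1 ≥ 3) := by norm_num
      simp [pvALoop, hk, this]
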